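-- pv_equiv track=rewrite | github.com/trihoangdev/python-28tech | contest-03/ex11.py | sum_prime_digit
-- ===== SOURCE A (Python) =====
-- def sum_prime_digit(n):
--     res = 0
--     while n != 0:
--         digit = n % 10
--         if digit == 2 or digit == 3 or digit == 5 or digit == 7:
--             res += digit
--             n //= 10
--         else:
--             return False
--     return is_prime(res)
--
-- def is_prime(n):
--     if n < 2:
--         return False
--     for i in range(2, isqrt(n) + 1):
--         if n % i == 0:
--             return False
--     return True
-- ===== SOURCE B (Python) =====
-- from math import isqrt
--
--
-- def sum_prime_digit(n):
--     # Validate over the decimal string (most-significant first), then test the digit sum.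
--     s = str(n)
--     if not all(c in {'2', '3', '5', '7'} for c in s):
--         return False
--     return is_prime(sum(int(c) for c in s))
--
--
-- def is_prime(n):
--     if n < 2:
--         return False
--     for i in range(2, isqrt(n) + 1):
--         if n % i == 0:
--             return False
--     return True
-- ===== Notes on version B (the rewrite author's own statement) =====
-- stated objective: idiomatic
-- what changed: B converts n to its decimal string once, validates in a most-significant-first pass that every character is a prime digit (so '-' and '0' reject negatives and zero), and only then sums the digit characters and tests the sum's primality, replacing A's least-significant-first arithmetic digit extraction with %10 and //=10 interleaved with accumulation.
-- crash fix: On positive n all of whose decimal digits are prime (2,3,5,7), A raises NameError (its module never imports isqrt, reached when the primality test of the positive digit sum runs), while B returns the primality of the digit sum. — e.g. on sum_prime_digit(2): A raises NameError, B returns true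
import Mathlib
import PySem

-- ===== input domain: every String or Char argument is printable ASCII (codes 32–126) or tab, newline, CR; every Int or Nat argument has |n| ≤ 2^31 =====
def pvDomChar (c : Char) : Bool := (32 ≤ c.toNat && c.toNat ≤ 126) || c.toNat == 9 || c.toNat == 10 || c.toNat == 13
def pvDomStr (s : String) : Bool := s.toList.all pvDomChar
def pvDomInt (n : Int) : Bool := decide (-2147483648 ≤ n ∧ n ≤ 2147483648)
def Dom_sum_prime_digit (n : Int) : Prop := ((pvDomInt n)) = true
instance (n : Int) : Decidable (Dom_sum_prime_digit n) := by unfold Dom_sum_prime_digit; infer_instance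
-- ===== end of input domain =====

-- B validates the decimal string most-significant-first and then tests the primality of the
-- digit sum, instead of A's least-significant-first %10 / //=10 extraction with accumulation
-- (objective: idiomatic decomposition; same asymptotic cost).

-- ===== PORT A =====
-- is_prime: shared helper (Source B keeps it unchanged). math.isqrt(n) for n ≥ 0 is Int.sqrt.
-- 'for i in range(..): if n % i == 0: return False / return True' is the all-loop below.
def is_prime (n : Int) : Bool :=
  if n < 2 then false
  else (PySem.List.pyRange 2 (Int.sqrt n + 1) 1).all (fun i => !(PySem.Int.mod n i == 0))

-- the while-loop of A, with its state (n, res)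
def sumPrimeLoop (n res : Int) : Bool :=
  if n = 0 then is_prime res
  else
    let digit := PySem.Int.mod n 10
    if digit = 2 ∨ digit = 3 ∨ digit = 5 ∨ digit = 7 then
      sumPrimeLoop (PySem.Int.floordiv n 10) (res + digit)
    else false
termination_by n.natAbs
decreasing_by
  have h1 := PySem.Int.floordiv_mul_add_mod n 10
  rename_i _hn hd
  rcases hd with h | h | h | h <;> omega

def sum_prime_digit (n : Int) : Bool := sumPrimeLoop n 0

-- ===== PORT B =====
-- s = str(n); chars of s are (PySem.Int.toStr n).toList = PySem.Int.toChars n.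
-- 'c in {'2','3','5','7'}' is membership in that 4-element (distinct) set literal.
-- int(c) = c.toNat - 48: exact here since the all-check guarantees c is a digit character.
def sum_prime_digit_alt (n : Int) : Bool :=
  let s := PySem.Int.toChars n
  if !(s.all (fun c => ['2', '3', '5', '7'].contains c)) then false
  else is_prime ((s.map (fun c => ((c.toNat : Int) - 48))).sum)

-- ===== PRECONDITION & SPEC =====
-- Pre_ excludes exactly the inputs on which A raises: A's module lacks 'from math import isqrt',
-- so A raises NameError whenever its loop completes with a positive digit sum, i.e. exactly on
-- positive n all of whose decimal digits are prime (2, 3, 5 or 7).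
def Pre_sum_prime_digit (n : Int) : Prop :=
  ¬ (0 < n ∧ (Nat.toDigits 10 n.toNat).all (fun c => ['2', '3', '5', '7'].contains c) = true)
instance (n : Int) : Decidable (Pre_sum_prime_digit n) := by unfold Pre_sum_prime_digit; infer_instance
def pvWitness_sum_prime_digit : Int := (41)

-- On positive n whose decimal digits are all prime, A raises NameError (missing isqrt import)
-- while B returns the primality of the digit sum.
def Raises_sum_prime_digit (n : Int) : Prop :=
  0 < n ∧ (Nat.toDigits 10 n.toNat).all (fun c => ['2', '3', '5', '7'].contains c) = true
instance (n : Int) : Decidable (Raises_sum_prime_digit n) := by unfold Raises_sum_prime_digit; infer_instance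
def pvRaiseWitness_sum_prime_digit : Int := (2)
def pvRaiseWitnessOut_sum_prime_digit : Bool := true

def Spec_sum_prime_digit (n : Int) (out : Bool) : Prop := out = sum_prime_digit_alt n
instance (n : Int) (out : Bool) : Decidable (Spec_sum_prime_digit n out) := by unfold Spec_sum_prime_digit; infer_instance

-- ===== CLAIM (what is proved, stated in full; the proofs are below) =====
def Claim_equal_sum_prime_digit : Prop := ∀ (n : Int), Dom_sum_prime_digit n → Pre_sum_prime_digit n → Spec_sum_prime_digit n (sum_prime_digit n)
def Claim_raises_sum_prime_digit : Prop := (∀ (n : Int), Dom_sum_prime_digit n → Raises_sum_prime_digit n → ¬ Pre_sum_prime_digit n) ∧ (Dom_sum_prime_digit (pvRaiseWitness_sum_prime_digit) ∧ Raises_sum_prime_digit (pvRaiseWitness_sum_prime_digit) ∧ sum_prime_digit_alt (pvRaiseWitness_sum_prime_digit) = pvRaiseWitnessOut_sum_prime_digit)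

-- ===== LEMMAS AND PROOFS =====

-- abbreviations for the two passes of B (proof-side only)
def primeC (c : Char) : Bool := ['2', '3', '5', '7'].contains c
def dsum (cs : List Char) : Int := (cs.map (fun c => ((c.toNat : Int) - 48))).sum

theorem all_primeC (cs : List Char) :
    cs.all (fun c => ['2', '3', '5', '7'].contains c) = cs.all primeC := rfl

theorem dsum_append (xs ys : List Char) : dsum (xs ++ ys) = dsum xs + dsum ys := by
  simp [dsum]

-- Nat.toDigitsCore facts (accumulator and fuel irrelevance, one-step peel)
theorem toDigitsCore_acc (b : Nat) : ∀ (fuel n : Nat) (acc : List Char),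
    Nat.toDigitsCore b fuel n acc = Nat.toDigitsCore b fuel n [] ++ acc := by
  intro fuel
  induction fuel with
  | zero => intro n acc; simp [Nat.toDigitsCore]
  | succ f ih =>
    intro n acc
    simp only [Nat.toDigitsCore]
    by_cases h : n / b = 0
    · simp [h]
    · simp only [h]
      rw [ih (n / b) ((n % b).digitChar :: acc), ih (n / b) [(n % b).digitChar]]
      simp

theorem toDigitsCore_fuel : ∀ (f1 : Nat), ∀ (f2 n : Nat), n < f1 → n < f2 →
    Nat.toDigitsCore 10 f1 n [] = Nat.toDigitsCore 10 f2 n [] := by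
  intro f1
  induction f1 with
  | zero => intro f2 n h1 _; omega
  | succ f ih =>
    intro f2 n h1 h2
    cases f2 with
    | zero => omega
    | succ g =>
      simp only [Nat.toDigitsCore]
      by_cases h : n / 10 = 0
      · simp [h]
      · simp only [h]
        rw [toDigitsCore_acc, toDigitsCore_acc 10 g]
        have hlt : n / 10 < n := Nat.div_lt_self (by omega) (by omega)
        rw [ih (n := n / 10) (f2 := g) (by omega) (by omega)]

theorem toDigits_small (m : Nat) (h : m < 10) : Nat.toDigits 10 m = [Nat.digitChar m] := by
  have h0 : m / 10 = 0 := Nat.div_eq_of_lt h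
  have h1 : m % 10 = m := Nat.mod_eq_of_lt h
  simp [Nat.toDigits, Nat.toDigitsCore, h0, h1]

theorem toDigits_peel (m : Nat) (h : 10 ≤ m) :
    Nat.toDigits 10 m = Nat.toDigits 10 (m / 10) ++ [Nat.digitChar (m % 10)] := by
  have h0 : m / 10 ≠ 0 := by
    have := Nat.le_div_iff_mul_le (k := 10) (by omega) (x := m) (y := 1)
    omega
  have hlt : m / 10 < m := Nat.div_lt_self (by omega) (by omega)
  show Nat.toDigitsCore 10 (m + 1) m [] = _
  simp only [Nat.toDigitsCore, h0]
  rw [toDigitsCore_acc]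
  rw [toDigitsCore_fuel m (m / 10 + 1) (m / 10) (by omega) (by omega)]
  rfl

-- character-level facts about a single digit
theorem digitChar_primeC (d : Nat) (h : d < 10) :
    primeC (Nat.digitChar d) = decide (d = 2 ∨ d = 3 ∨ d = 5 ∨ d = 7) := by
  interval_cases d <;> decide

theorem digitChar_val (d : Nat) (h : d < 10) :
    ((Nat.digitChar d).toNat : Int) - 48 = (d : Int) := by
  interval_cases d <;> decide

theorem dsum_digitChar (d : Nat) (h : d < 10) : dsum [Nat.digitChar d] = (d : Int) := by
  simp [dsum, digitChar_val d h]

-- A's loop returns False on every negative n (the digit 9 is eventually hit)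
theorem sumPrimeLoop_neg : ∀ (k : Nat) (n : Int), n.natAbs ≤ k → n < 0 → ∀ res,
    sumPrimeLoop n res = false := by
  intro k
  induction k with
  | zero => intro n hk hn res; omega
  | succ k ih =>
    intro n hk hn res
    rw [sumPrimeLoop]
    have hne : ¬ (n = 0) := by omega
    simp only [hne, if_false]
    by_cases hd : PySem.Int.mod n 10 = 2 ∨ PySem.Int.mod n 10 = 3 ∨
        PySem.Int.mod n 10 = 5 ∨ PySem.Int.mod n 10 = 7
    · simp only [hd, if_true]
      have h1 := PySem.Int.floordiv_mul_add_mod n 10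
      have h2 := PySem.Int.mod_nonneg n (b := 10) (by omega)
      have h3 := PySem.Int.mod_lt n (b := 10) (by omega)
      apply ih
      · rcases hd with h | h | h | h <;> omega
      · rcases hd with h | h | h | h <;> omega
    · rw [if_neg hd]

-- A's loop on a positive n computes B's two passes over its decimal digits
theorem sumPrimeLoop_pos : ∀ (k : Nat) (m : Nat), m ≤ k → 0 < m → ∀ res : Int,
    sumPrimeLoop (m : Int) res =
      (if (Nat.toDigits 10 m).all primeC then is_prime (res + dsum (Nat.toDigits 10 m))
       else false) := by
  intro k
  induction k with
  | zero => intro m hk h0 res; omega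
  | succ k ih =>
    intro m hk h0 res
    rw [sumPrimeLoop]
    have hne : ¬ ((m : Int) = 0) := by omega
    simp only [hne, if_false]
    have hmod : PySem.Int.mod (m : Int) 10 = ((m % 10 : Nat) : Int) := by
      exact_mod_cast PySem.Int.mod_natCast m 10
    have hdiv : PySem.Int.floordiv (m : Int) 10 = ((m / 10 : Nat) : Int) := by
      exact_mod_cast PySem.Int.floordiv_natCast m 10
    have hd10 : m % 10 < 10 := Nat.mod_lt m (by omega)
    by_cases hsmall : m < 10
    · -- single digit: toDigits 10 m = [digitChar m]
      have hm10 : m % 10 = m := Nat.mod_eq_of_lt hsmall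
      have hm0 : m / 10 = 0 := Nat.div_eq_of_lt hsmall
      rw [toDigits_small m hsmall]
      by_cases hd : m = 2 ∨ m = 3 ∨ m = 5 ∨ m = 7
      · have hd' : PySem.Int.mod (m : Int) 10 = 2 ∨ PySem.Int.mod (m : Int) 10 = 3 ∨
            PySem.Int.mod (m : Int) 10 = 5 ∨ PySem.Int.mod (m : Int) 10 = 7 := by
          rw [hmod, hm10]; rcases hd with h | h | h | h <;> simp [h]
        simp only [hd', if_true, hdiv, hm0]
        rw [sumPrimeLoop]
        simp only [Nat.cast_zero, if_true]
        have : (Nat.toDigits 10 m).all primeC = true := by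
          rw [toDigits_small m hsmall]
          simp [List.all, digitChar_primeC m hsmall, hd]
        rw [toDigits_small m hsmall] at this
        simp only [this, if_true]
        rw [dsum_digitChar m hsmall, hmod, hm10]
      · have hd' : ¬ (PySem.Int.mod (m : Int) 10 = 2 ∨ PySem.Int.mod (m : Int) 10 = 3 ∨
            PySem.Int.mod (m : Int) 10 = 5 ∨ PySem.Int.mod (m : Int) 10 = 7) := by
          rw [hmod, hm10]
          intro hc
          apply hd
          rcases hc with h | h | h | h
          · left; exact_mod_cast h
          · right; left; exact_mod_cast h
          · right; right; left; exact_mod_cast h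
          · right; right; right; exact_mod_cast h
        simp only [hd', if_false]
        have : primeC (Nat.digitChar m) = false := by
          rw [digitChar_primeC m hsmall]; simpa using hd
        simp [List.all, this]
    · -- m ≥ 10: peel the last digit
      have hpeel := toDigits_peel m (by omega)
      rw [hpeel]
      set d := m % 10 with hddef
      by_cases hd : d = 2 ∨ d = 3 ∨ d = 5 ∨ d = 7
      · have hd' : PySem.Int.mod (m : Int) 10 = 2 ∨ PySem.Int.mod (m : Int) 10 = 3 ∨
            PySem.Int.mod (m : Int) 10 = 5 ∨ PySem.Int.mod (m : Int) 10 = 7 := by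
          rw [hmod]; rcases hd with h | h | h | h <;> simp [h]
        simp only [hd', if_true, hdiv]
        have hrec : m / 10 ≤ k := by
          have : m / 10 < m := Nat.div_lt_self (by omega) (by omega)
          omega
        rw [ih (m / 10) hrec (by omega) (res + PySem.Int.mod (m : Int) 10)]
        have hp : primeC (Nat.digitChar d) = true := by
          rw [digitChar_primeC d hd10]; simpa using hd
        rw [List.all_append]
        simp only [List.all, hp, Bool.and_true]
        rw [dsum_append, dsum_digitChar d hd10, hmod]
        by_cases hall : (Nat.toDigits 10 (m / 10)).all primeC = true
        · simp only [hall, if_true]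
          ring_nf
        · simp only [Bool.not_eq_true] at hall
          simp [hall]
      · have hd' : ¬ (PySem.Int.mod (m : Int) 10 = 2 ∨ PySem.Int.mod (m : Int) 10 = 3 ∨
            PySem.Int.mod (m : Int) 10 = 5 ∨ PySem.Int.mod (m : Int) 10 = 7) := by
          rw [hmod]
          intro hc
          apply hd
          rcases hc with h | h | h | h
          · left; exact_mod_cast h
          · right; left; exact_mod_cast h
          · right; right; left; exact_mod_cast h
          · right; right; right; exact_mod_cast h
        simp only [hd', if_false]
        have hp : primeC (Nat.digitChar d) = false := by
          rw [digitChar_primeC d hd10]; simpa using hd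
        rw [List.all_append]
        simp [List.all, hp]

-- ===== VERDICT (by name: the statement is the Claim_ definition above) =====
theorem sum_prime_digit_spec : Claim_equal_sum_prime_digit := by
  intro n _ _
  unfold Spec_sum_prime_digit sum_prime_digit
  rcases lt_trichotomy n 0 with hn | hn | hn
  · -- negative: A's loop rejects, B sees the '-' character
    rw [sumPrimeLoop_neg n.natAbs n le_rfl hn]
    have : PySem.Int.toChars n = '-' :: Nat.toDigits 10 n.natAbs := by
      simp [PySem.Int.toChars, hn]
    simp [sum_prime_digit_alt, this]
  · subst hn
    rw [sumPrimeLoop]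
    simp only [if_true]
    decide
  · -- positive
    have hchars : PySem.Int.toChars n = Nat.toDigits 10 n.toNat := by
      simp [PySem.Int.toChars]; omega
    have hcast : n = ((n.toNat : Nat) : Int) := by omega
    have hA : sumPrimeLoop n 0 =
        (if (Nat.toDigits 10 n.toNat).all primeC then
          is_prime (dsum (Nat.toDigits 10 n.toNat)) else false) := by
      conv_lhs => rw [hcast]
      rw [sumPrimeLoop_pos n.toNat n.toNat le_rfl (by omega) 0]
      simp only [zero_add]
    have hB : sum_prime_digit_alt n =
        (if (Nat.toDigits 10 n.toNat).all primeC then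
          is_prime (dsum (Nat.toDigits 10 n.toNat)) else false) := by
      unfold sum_prime_digit_alt
      simp only [hchars]
      rw [all_primeC]
      cases hall : (Nat.toDigits 10 n.toNat).all primeC
      · simp
      · simp [dsum]
    rw [hA, ← hB]

@[simp] theorem sum_prime_digit_raises : Claim_raises_sum_prime_digit := by
  unfold Claim_raises_sum_prime_digit
  refine ⟨fun n _ hr hpre => hpre hr, by decide, by decide, ?_⟩
  have hc : PySem.Int.toChars 2 = ['2'] := by decide
  unfold sum_prime_digit_alt pvRaiseWitness_sum_prime_digit pvRaiseWitnessOut_sum_prime_digit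
  rw [hc]
  simp [is_prime]
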